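-- pv_equiv track=rewrite | github.com/TatyanaA90/algorithm-practice | solutions/skyline_tally.py | skyline
-- ===== SOURCE A (Python) =====
-- def skyline(building_list):
--     highest_value = 0  # can't see anything until it's taller than 0
--     result = []
--
--     for height in building_list:
--         if height > highest_value:
--             result.append(height)
--
--             # update the tallest height to what we just found
--             highest_value = height
--
--     return result
-- ===== SOURCE B (Python) =====
-- def skyline(building_list):
--     # table-then-filter decomposition: prefix[i] = max of 0 and all heights before index i
--     prefix = [0]
--     for h in building_list:
--         prefix.append(max(prefix[-1], h))
--     return [h for h, p in zip(building_list, prefix) if h > p]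
-- ===== Notes on version B (the rewrite author's own statement) =====
-- stated objective: alternative
-- what changed: Replaces the single stateful running-max-with-append loop by a build-a-table-then-filter decomposition: first compute the 0-seeded prefix-maximum sequence, then filter each height against its prefix maximum with zip.
import Mathlib
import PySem

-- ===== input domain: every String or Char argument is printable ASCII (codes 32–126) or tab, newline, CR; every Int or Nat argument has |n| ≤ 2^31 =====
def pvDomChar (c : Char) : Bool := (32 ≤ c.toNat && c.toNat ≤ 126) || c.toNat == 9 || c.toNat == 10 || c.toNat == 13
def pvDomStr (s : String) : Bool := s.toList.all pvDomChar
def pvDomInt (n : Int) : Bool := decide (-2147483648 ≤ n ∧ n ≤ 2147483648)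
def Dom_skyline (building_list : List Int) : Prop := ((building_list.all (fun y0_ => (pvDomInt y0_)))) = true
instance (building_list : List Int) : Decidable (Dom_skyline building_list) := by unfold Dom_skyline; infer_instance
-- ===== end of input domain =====

-- B replaces A's single stateful running-max loop by a prefix-maximum table plus a zip/filter pass (alternative decomposition, same cost).


-- ===== PORT A =====
-- the loop carries (highest_value, result)
def skyline (building_list : List Int) : List Int :=
  (building_list.foldl (fun (st : Int × List Int) height =>
      if height > st.1 then (height, st.2 ++ [height]) else st) (0, [])).2

-- ===== PORT B =====
-- prefix-maximum sequence seeded with m (Source B builds it with a loop appending max(prefix[-1], h))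
def skylinePrefix (m : Int) : List Int → List Int
  | [] => [m]
  | h :: t => m :: skylinePrefix (max m h) t

def skyline_alt (building_list : List Int) : List Int :=
  ((building_list.zip (skylinePrefix 0 building_list)).filter
      (fun p => p.1 > p.2)).map Prod.fst

-- ===== PRECONDITION & SPEC =====
def Spec_skyline (building_list : List Int) (out : List Int) : Prop := out = skyline_alt building_list
instance (building_list : List Int) (out : List Int) : Decidable (Spec_skyline building_list out) := by unfold Spec_skyline; infer_instance

-- ===== CLAIM (what is proved, stated in full; the proofs are below) =====
def Claim_equal_skyline : Prop := ∀ (building_list : List Int), Dom_skyline building_list → Spec_skyline building_list (skyline building_list)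

-- ===== LEMMAS AND PROOFS =====
theorem skyline_loop_eq (l : List Int) : ∀ (m : Int) (acc : List Int),
    (l.foldl (fun (st : Int × List Int) height =>
      if height > st.1 then (height, st.2 ++ [height]) else st) (m, acc)).2
    = acc ++ ((l.zip (skylinePrefix m l)).filter (fun p => p.1 > p.2)).map Prod.fst := by
  induction l with
  | nil => intro m acc; simp [skylinePrefix]
  | cons h t ih =>
    intro m acc
    simp only [List.foldl, skylinePrefix, List.zip_cons_cons, List.filter]
    by_cases hmh : h > m
    · have : max m h = h := by omega
      simp [hmh, this, ih h (acc ++ [h])]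
    · have : max m h = m := by omega
      simp [hmh, this, ih m acc]

-- ===== VERDICT (by name: the statement is the Claim_ definition above) =====
theorem skyline_spec : Claim_equal_skyline := by
  intro l _
  show _ = _
  simpa [skyline, skyline_alt] using skyline_loop_eq l 0 []
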